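-- pv_equiv track=rewrite | github.com/pypi-data/pypi-mirror-340 | packages/tenkn/tenkn-1.0.0-py3-none-any.whl/tenkn.py | encode_10kn
-- ===== SOURCE A (Python) =====
-- BASE_10KN = 10000
--
-- HANGUL_OFFSET = 0xAC00  # '가' = 0
--
-- def encode_10kn(n: int) -> str:
--     if n == 0:
--         return chr(HANGUL_OFFSET)
--     result = []
--     while n > 0:
--         digit = n % BASE_10KN
--         ch = chr(HANGUL_OFFSET + digit)
--         result.insert(0, ch)
--         n //= BASE_10KN
--     return ''.join(result)
-- ===== SOURCE B (Python) =====
-- BASE_10KN = 10000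
--
-- HANGUL_OFFSET = 0xAC00  # '가' = 0
--
-- def encode_10kn(n: int) -> str:
--     if n == 0:
--         return chr(HANGUL_OFFSET)
--     d = 0
--     m = n
--     while m > 0:
--         d += 1
--         m //= BASE_10KN
--     out = []
--     for i in range(d - 1, -1, -1):
--         digit = (n // BASE_10KN ** i) % BASE_10KN
--         out.append(chr(HANGUL_OFFSET + digit))
--     return ''.join(out)
-- ===== Notes on version B (the rewrite author's own statement) =====
-- stated objective: alternative
-- what changed: B first counts the base-10000 digits, then emits the string most-significant-first by dividing n by powers of the base, instead of A's LSB-first repeated //= with insert(0, ...) (which is O(d^2) in list moves).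
import Mathlib
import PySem

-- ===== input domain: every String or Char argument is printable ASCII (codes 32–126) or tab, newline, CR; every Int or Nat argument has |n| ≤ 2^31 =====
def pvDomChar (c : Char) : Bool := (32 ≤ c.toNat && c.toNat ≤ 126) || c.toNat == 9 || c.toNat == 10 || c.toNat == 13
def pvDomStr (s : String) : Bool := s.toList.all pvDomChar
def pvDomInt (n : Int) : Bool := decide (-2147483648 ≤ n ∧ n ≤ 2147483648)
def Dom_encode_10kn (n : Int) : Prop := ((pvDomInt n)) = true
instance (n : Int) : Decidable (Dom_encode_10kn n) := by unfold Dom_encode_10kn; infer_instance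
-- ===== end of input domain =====

-- B builds the string most-significant-digit-first from a digit count and powers of the base,
-- instead of A's least-significant-first loop with front insertion; same values, no speed claim.

-- ===== PORT A =====
-- the while loop: result accumulates LSB-first via insert(0, ch); n //= 10000 each round
def pvLoopA (n : Int) (acc : List Char) : List Char :=
  if 0 < n then
    pvLoopA (PySem.Int.floordiv n 10000)
      (Char.ofNat (0xAC00 + PySem.Int.mod n 10000).toNat :: acc)
  else acc
termination_by n.toNat
decreasing_by
  rw [PySem.Int.floordiv_eq_ediv_of_pos (by norm_num : (0:Int) < 10000)]
  omega

def encode_10kn (n : Int) : String :=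
  if n = 0 then String.ofList [Char.ofNat 0xAC00]
  else String.ofList (pvLoopA n [])

-- ===== PORT B =====
-- the first while loop of B: count base-10000 digits of m
def pvDigitCount (m : Int) : Nat :=
  if 0 < m then pvDigitCount (PySem.Int.floordiv m 10000) + 1 else 0
termination_by m.toNat
decreasing_by
  rw [PySem.Int.floordiv_eq_ediv_of_pos (by norm_num : (0:Int) < 10000)]
  omega

def encode_10kn_alt (n : Int) : String :=
  if n = 0 then String.ofList [Char.ofNat 0xAC00]
  else
    -- for i in range(d-1, -1, -1): out.append(chr(0xAC00 + (n // 10000**i) % 10000))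
    String.ofList ((List.range (pvDigitCount n)).reverse.map
      (fun i => Char.ofNat (0xAC00 + PySem.Int.mod (PySem.Int.floordiv n (10000 ^ i)) 10000).toNat))

-- ===== PRECONDITION & SPEC =====
def Spec_encode_10kn (n : Int) (out : String) : Prop := out = encode_10kn_alt n
instance (n : Int) (out : String) : Decidable (Spec_encode_10kn n out) := by unfold Spec_encode_10kn; infer_instance

-- ===== CLAIM (what is proved, stated in full; the proofs are below) =====
def Claim_equal_encode_10kn : Prop := ∀ (n : Int), Dom_encode_10kn n → Spec_encode_10kn n (encode_10kn n)

-- ===== LEMMAS AND PROOFS =====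

theorem pv_floordiv_floordiv (n : Int) (i : Nat) :
    PySem.Int.floordiv (PySem.Int.floordiv n 10000) (10000 ^ i) =
      PySem.Int.floordiv n (10000 ^ (i + 1)) := by
  rw [PySem.Int.floordiv_eq_ediv_of_pos (by norm_num : (0:Int) < 10000),
      PySem.Int.floordiv_eq_ediv_of_pos (by positivity : (0:Int) < 10000 ^ i),
      PySem.Int.floordiv_eq_ediv_of_pos (by positivity : (0:Int) < 10000 ^ (i + 1))]
  rw [Int.ediv_ediv_of_nonneg (by norm_num : (0:Int) ≤ 10000), pow_succ, mul_comm]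

theorem pvLoopA_eq (n : Int) (acc : List Char) :
    pvLoopA n acc =
      ((List.range (pvDigitCount n)).reverse.map
        (fun i => Char.ofNat (0xAC00 + PySem.Int.mod (PySem.Int.floordiv n (10000 ^ i)) 10000).toNat))
      ++ acc := by
  by_cases h : 0 < n
  · rw [pvLoopA, if_pos h, pvDigitCount, if_pos h]
    rw [pvLoopA_eq (PySem.Int.floordiv n 10000)]
    rw [List.range_succ_eq_map]
    simp only [List.reverse_cons, List.map_append, List.map_reverse, List.map_map,
      pv_floordiv_floordiv]
    simp [List.append_assoc]
  · rw [pvLoopA, if_neg h, pvDigitCount, if_neg h]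
    simp
termination_by n.toNat
decreasing_by
  rw [PySem.Int.floordiv_eq_ediv_of_pos (by norm_num : (0:Int) < 10000)]
  omega

-- ===== VERDICT (by name: the statement is the Claim_ definition above) =====
theorem encode_10kn_spec : Claim_equal_encode_10kn := by
  intro n _
  unfold Spec_encode_10kn encode_10kn encode_10kn_alt
  by_cases hz : n = 0
  · simp [hz]
  · rw [if_neg hz, if_neg hz, pvLoopA_eq, List.append_nil]
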